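-- pv_equiv track=rewrite | github.com/mikebayth/HardGBM | GBM/hw_impl/utils/Build_vlg.py | get_onehot
-- ===== SOURCE A (Python) =====
-- def get_onehot(num,length):
--     tempstr = ""
--     for i in range(length):
--         if i == num:
--             tempstr += '1'
--         else:
--             tempstr += '0'
--     return tempstr
-- ===== SOURCE B (Python) =====
-- def get_onehot(num, length):
--     if 0 <= num < length:
--         return '0' * num + '1' + '0' * (length - num - 1)
--     return '0' * max(length, 0)
-- ===== Notes on version B (the rewrite author's own statement) =====
-- stated objective: simpler
-- what changed: Replaces the per-index loop with a closed-form construction from three fixed segments via string repetition ('0'*num + '1' + '0'*(length-num-1), or all zeros when num is out of range).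
import Mathlib
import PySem

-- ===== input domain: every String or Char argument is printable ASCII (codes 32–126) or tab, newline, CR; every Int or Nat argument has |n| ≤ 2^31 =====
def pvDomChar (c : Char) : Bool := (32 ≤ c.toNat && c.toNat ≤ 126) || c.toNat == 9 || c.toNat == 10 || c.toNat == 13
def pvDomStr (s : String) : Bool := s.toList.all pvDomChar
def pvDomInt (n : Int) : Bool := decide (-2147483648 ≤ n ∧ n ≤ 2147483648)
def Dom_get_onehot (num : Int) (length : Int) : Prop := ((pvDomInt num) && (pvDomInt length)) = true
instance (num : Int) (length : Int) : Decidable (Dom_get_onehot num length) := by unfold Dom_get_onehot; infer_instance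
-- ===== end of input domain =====

-- B replaces the per-index loop with a closed-form three-segment construction (simpler; same cost).

-- ===== PORT A =====
-- loop over range(length), appending '1' at index num and '0' elsewhere (strings as List Char)
def get_onehot (num : Int) (length : Int) : String :=
  String.ofList ((PySem.List.pyRange 0 length 1).foldl
    (fun acc i => acc ++ (if i = num then ['1'] else ['0'])) [])

-- ===== PORT B =====
def get_onehot_alt (num : Int) (length : Int) : String :=
  if 0 ≤ num ∧ num < length then
    String.ofList (List.replicate num.toNat '0' ++ ['1'] ++ List.replicate (length - num - 1).toNat '0')
  else
    String.ofList (List.replicate (max length 0).toNat '0')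

-- ===== PRECONDITION & SPEC =====
def Spec_get_onehot (num : Int) (length : Int) (out : String) : Prop := out = get_onehot_alt num length
instance (num : Int) (length : Int) (out : String) : Decidable (Spec_get_onehot num length out) := by unfold Spec_get_onehot; infer_instance

-- ===== CLAIM (what is proved, stated in full; the proofs are below) =====
def Claim_equal_get_onehot : Prop := ∀ (num : Int) (length : Int), Dom_get_onehot num length → Spec_get_onehot num length (get_onehot num length)

-- ===== LEMMAS AND PROOFS =====

theorem onehot_fold_range (num : Int) (n : Nat) :
    ((List.range n).map (fun k : Nat => (k : Int))).foldl
      (fun acc i => acc ++ (if i = num then ['1'] else ['0'])) ([] : List Char) =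
    if 0 ≤ num ∧ num < (n : Int) then
      List.replicate num.toNat '0' ++ ['1'] ++ List.replicate (n - num.toNat - 1) '0'
    else List.replicate n '0' := by
  induction n with
  | zero => simp
  | succ n ih =>
    rw [List.range_succ]
    simp only [List.map_append, List.map_cons, List.map_nil, List.foldl_append]
    rw [ih]
    by_cases h : 0 ≤ num ∧ num < (n : Int)
    · have h' : 0 ≤ num ∧ num < ((n + 1 : Nat) : Int) := by push_cast; omega
      rw [if_pos h, if_pos h']
      have hne : (n : Int) ≠ num := by omega
      simp only [List.foldl_cons, List.foldl_nil, if_neg hne]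
      have : n + 1 - num.toNat - 1 = (n - num.toNat - 1) + 1 := by omega
      rw [this, List.replicate_succ']
      simp
    · rw [if_neg h]
      by_cases hn : num = (n : Int)
      · have h' : 0 ≤ num ∧ num < ((n + 1 : Nat) : Int) := by constructor <;> omega
        rw [if_pos h']
        simp only [List.foldl_cons, List.foldl_nil, if_pos hn.symm]
        have h1 : num.toNat = n := by omega
        have h2 : n + 1 - num.toNat - 1 = 0 := by omega
        simp [h1]
      · have h' : ¬ (0 ≤ num ∧ num < ((n + 1 : Nat) : Int)) := by push_cast; omega
        rw [if_neg h']
        simp only [List.foldl_cons, List.foldl_nil]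
        rw [if_neg (show ¬((n : Int) = num) from fun e => hn e.symm), List.replicate_succ']

-- ===== VERDICT (by name: the statement is the Claim_ definition above) =====
theorem get_onehot_spec : Claim_equal_get_onehot := by
  intro num length _
  unfold Spec_get_onehot get_onehot get_onehot_alt
  rw [PySem.List.pyRange_one]
  simp only [sub_zero, zero_add]
  rw [onehot_fold_range]
  by_cases h : 0 ≤ num ∧ num < length
  · have hl : num < (length.toNat : Int) := by omega
    rw [if_pos ⟨h.1, hl⟩, if_pos h]
    have : (length - num - 1).toNat = length.toNat - num.toNat - 1 := by omega
    rw [this]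
  · have h' : ¬ (0 ≤ num ∧ num < (length.toNat : Int)) := by omega
    rw [if_neg h', if_neg h]
    have : (max length 0).toNat = length.toNat := by omega
    rw [this]
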